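-- pv_equiv track=rewrite | github.com/yaohj11/S3LG | lib/eval/tools.py | process_seq_for_slt
-- ===== SOURCE A (Python) =====
-- from itertools import groupby
--
-- def process_seq_for_slt(raw_seq, end_token, mode='first'):
--     '''
--         cut seq from end_token.
--     '''
--     x = [x[0] for x in groupby(raw_seq)]
--     if end_token not in x:
--         return x
--     elif mode == 'first':
--         pos = x.index(end_token)
--         return x[:pos]
--     else:
--         pos = len(x)-1 - x[::-1].index(end_token)
--         return x[:pos]
-- ===== SOURCE B (Python) =====
-- def process_seq_for_slt(raw_seq, end_token, mode='first'):
--     '''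
--         cut seq from end_token. One fused pass: collapse consecutive
--         duplicates and track the cut position at the same time.
--     '''
--     out = []
--     cut = None
--     for v in raw_seq:
--         if not out or v != out[-1]:
--             out.append(v)
--             if v == end_token:
--                 cut = len(out) - 1
--                 if mode == 'first':
--                     break
--     if cut is None:
--         return out
--     return out[:cut]
-- ===== Notes on version B (the rewrite author's own statement) =====
-- stated objective: alternative
-- what changed: Replaces the groupby-then-membership-then-index/reversed-index multi-pass pipeline with a single fused loop that collapses consecutive duplicates while tracking the cut position (breaking early in 'first' mode).
import Mathlib
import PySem

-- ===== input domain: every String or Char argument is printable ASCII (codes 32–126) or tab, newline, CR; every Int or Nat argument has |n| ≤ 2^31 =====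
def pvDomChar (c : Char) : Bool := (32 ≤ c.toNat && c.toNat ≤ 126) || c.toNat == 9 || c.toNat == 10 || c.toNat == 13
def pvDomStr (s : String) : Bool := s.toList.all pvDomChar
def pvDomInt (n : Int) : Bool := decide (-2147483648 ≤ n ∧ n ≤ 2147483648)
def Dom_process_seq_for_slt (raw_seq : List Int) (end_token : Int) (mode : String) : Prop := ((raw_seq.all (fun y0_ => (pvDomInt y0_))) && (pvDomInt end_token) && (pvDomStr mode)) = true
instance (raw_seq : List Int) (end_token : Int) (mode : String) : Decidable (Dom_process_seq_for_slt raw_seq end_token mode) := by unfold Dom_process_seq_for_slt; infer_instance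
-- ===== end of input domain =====

-- B collapses consecutive duplicates and tracks the cut position in one fused pass
-- instead of A's groupby / membership / index / reversed-index pipeline; return values agree.

-- ===== PORT A =====
-- groupby(raw_seq) firsts: drop elements equal to the previous one
def cAux : Int → List Int → List Int
  | _, [] => []
  | p, b :: rest => if b = p then cAux p rest else b :: cAux b rest

def collapse : List Int → List Int
  | [] => []
  | a :: rest => a :: cAux a rest

def process_seq_for_slt (raw_seq : List Int) (end_token : Int) (mode : String) : List Int :=
  let x := collapse raw_seq                      -- x = [x[0] for x in groupby(raw_seq)]
  if end_token ∉ x then x                        -- end_token not in x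
  else if mode = "first" then
    -- pos = x.index(end_token); membership holds so index? is some (ValueError impossible; getD 0 unreachable)
    PySem.List.slice x none (some (((PySem.List.index? x end_token).getD 0 : Nat) : Int))   -- x[:pos]
  else
    -- pos = len(x)-1 - x[::-1].index(end_token); x[::-1] = x.reverse (PySem.List.slice?_none_none_neg_one);
    -- membership holds so index? is some (getD 0 unreachable)
    PySem.List.slice x none
      (some ((x.length : Int) - 1 - (((PySem.List.index? x.reverse end_token).getD 0 : Nat) : Int)))  -- x[:pos]

-- ===== PORT B =====
def bloop (e : Int) (mode : String) : List Int → List Int → Option Nat → List Int × Option Nat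
  | [], out, cut => (out, cut)
  | v :: rest, out, cut =>
    if out.getLast? = some v then bloop e mode rest out cut      -- `not out or v != out[-1]` failed
    else
      let out' := out ++ [v]
      if v = e then
        if mode = "first" then (out', some (out'.length - 1))    -- break
        else bloop e mode rest out' (some (out'.length - 1))
      else bloop e mode rest out' cut

def process_seq_for_slt_alt (raw_seq : List Int) (end_token : Int) (mode : String) : List Int :=
  let p := bloop end_token mode raw_seq [] none
  match p.2 with
  | none => p.1
  | some c => p.1.take c

-- ===== PRECONDITION & SPEC =====
def Spec_process_seq_for_slt (raw_seq : List Int) (end_token : Int) (mode : String) (out : List Int) : Prop := out = process_seq_for_slt_alt raw_seq end_token mode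
instance (raw_seq : List Int) (end_token : Int) (mode : String) (out : List Int) : Decidable (Spec_process_seq_for_slt raw_seq end_token mode out) := by unfold Spec_process_seq_for_slt; infer_instance

-- ===== CLAIM (what is proved, stated in full; the proofs are below) =====
def Claim_equal_process_seq_for_slt : Prop := ∀ (raw_seq : List Int) (end_token : Int) (mode : String), Dom_process_seq_for_slt raw_seq end_token mode → Spec_process_seq_for_slt raw_seq end_token mode (process_seq_for_slt raw_seq end_token mode)

-- ===== LEMMAS AND PROOFS =====

-- finish step of B: apply the recorded cut
def fin (p : List Int × Option Nat) : List Int :=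
  match p.2 with
  | none => p.1
  | some c => p.1.take c

-- index of the LAST occurrence
def lastIndex? : List Int → Int → Option Nat
  | [], _ => none
  | v :: rest, e =>
    match lastIndex? rest e with
    | some i => some (i + 1)
    | none => if v = e then some 0 else none

theorem lastIndex?_eq_none_iff (x : List Int) (e : Int) : lastIndex? x e = none ↔ e ∉ x := by
  induction x with
  | nil => simp [lastIndex?]
  | cons v rest ih =>
    simp only [lastIndex?, List.mem_cons]
    cases h : lastIndex? rest e with
    | none =>
      have hnm : e ∉ rest := ih.mp h
      by_cases hv : v = e
      · subst hv; simp [hnm]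
      · have hv' : ¬ e = v := fun hh => hv hh.symm
        simp [hv, hv', hnm]
    | some i =>
      have hm : e ∈ rest := by
        by_contra hn
        rw [ih.mpr hn] at h
        simp at h
      simp [hm]

theorem lastIndex?_rev (x : List Int) (e : Int) :
    lastIndex? x e = (PySem.List.index? x.reverse e).map (fun j => x.length - 1 - j) := by
  induction x with
  | nil => simp [lastIndex?, PySem.List.index?_eq_idxOf?]
  | cons v rest ih =>
    simp only [lastIndex?, List.reverse_cons]
    by_cases hm : e ∈ rest
    · rw [PySem.List.index?_append_of_mem _ (by simpa using hm)]
      cases hj : PySem.List.index? rest.reverse e with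
      | none => rw [PySem.List.index?_eq_none_iff] at hj; simp at hj; exact absurd hm hj
      | some j =>
        obtain ⟨hlt, -, -⟩ := PySem.List.getElem_of_index?_eq_some hj
        simp only [List.length_reverse] at hlt
        rw [hj] at ih
        simp only [Option.map_some] at ih ⊢
        rw [ih]
        simp only [List.length_cons]
        simp
        omega
    · have hn : lastIndex? rest e = none := (lastIndex?_eq_none_iff rest e).mpr hm
      rw [hn]
      by_cases hv : v = e
      · subst hv
        rw [PySem.List.index?_append_singleton_self rest.reverse v (by simpa using hm)]
        simp
      · have hnr : e ∉ rest.reverse ++ [v] := by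
          simp only [List.mem_append, List.mem_reverse, List.mem_singleton]
          rintro (h | h)
          · exact hm h
          · exact hv h.symm
        rw [PySem.List.index?_eq_none_iff .. |>.mpr hnr]
        simp [hv]

-- B's loop in "first" mode: first occurrence in the collapsed tail cuts
theorem bloop_first (e : Int) (raw : List Int) : ∀ (p : Int) (out : List Int),
    out.getLast? = some p →
    fin (bloop e "first" raw out none) =
      (match PySem.List.index? (cAux p raw) e with
       | some i => out ++ (cAux p raw).take i
       | none => out ++ cAux p raw) := by
  induction raw with
  | nil => intro p out _; simp [bloop, cAux, fin, PySem.List.index?_eq_idxOf?]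
  | cons v rest ih =>
    intro p out hlast
    by_cases hvp : v = p
    · have hgl : out.getLast? = some v := by rw [hlast, hvp]
      rw [show bloop e "first" (v :: rest) out none = bloop e "first" rest out none from by
        simp [bloop, hgl]]
      rw [show cAux p (v :: rest) = cAux p rest from by simp [cAux, hvp]]
      exact ih p out hlast
    · have hne : ¬ (out.getLast? = some v) := by
        rw [hlast]; simp; exact fun h => hvp h.symm
      rw [show cAux p (v :: rest) = v :: cAux v rest from by simp [cAux, hvp]]
      by_cases hve : v = e
      · rw [show bloop e "first" (v :: rest) out none
              = (out ++ [v], some ((out ++ [v]).length - 1)) from by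
            subst hve; simp [bloop, hne]]
        rw [show PySem.List.index? (v :: cAux v rest) e = some 0 from by
          rw [hve]; exact PySem.List.index?_cons_self ..]
        simp [fin]
      · rw [show bloop e "first" (v :: rest) out none
              = bloop e "first" rest (out ++ [v]) none from by simp [bloop, hne, hve]]
        rw [ih v (out ++ [v]) (by simp)]
        rw [PySem.List.index?_cons_of_ne _ (fun h => hve h)]
        cases PySem.List.index? (cAux v rest) e <;> simp

-- B's loop in any other mode: last occurrence in the collapsed tail cuts
theorem bloop_last (e : Int) (mode : String) (hm : ¬ mode = "first") (raw : List Int) :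
    ∀ (p : Int) (out : List Int) (cut : Option Nat),
    out.getLast? = some p →
    fin (bloop e mode raw out cut) =
      (match lastIndex? (cAux p raw) e with
       | some i => (out ++ cAux p raw).take (out.length + i)
       | none => fin (out ++ cAux p raw, cut)) := by
  induction raw with
  | nil => intro p out cut _; simp [bloop, cAux, lastIndex?]
  | cons v rest ih =>
    intro p out cut hlast
    by_cases hvp : v = p
    · have hgl : out.getLast? = some v := by rw [hlast, hvp]
      rw [show bloop e mode (v :: rest) out cut = bloop e mode rest out cut from by
        simp [bloop, hgl]]
      rw [show cAux p (v :: rest) = cAux p rest from by simp [cAux, hvp]]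
      exact ih p out cut hlast
    · have hne : ¬ (out.getLast? = some v) := by
        rw [hlast]; simp; exact fun h => hvp h.symm
      rw [show cAux p (v :: rest) = v :: cAux v rest from by simp [cAux, hvp]]
      by_cases hve : v = e
      · rw [show bloop e mode (v :: rest) out cut
              = bloop e mode rest (out ++ [v]) (some ((out ++ [v]).length - 1)) from by
            subst hve; simp [bloop, hne, hm]]
        rw [ih v (out ++ [v]) _ (by simp)]
        rw [show (lastIndex? (v :: cAux v rest) e)
              = (match lastIndex? (cAux v rest) e with
                 | some i => some (i + 1)
                 | none => some 0) from by simp [lastIndex?, hve]]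
        cases h : lastIndex? (cAux v rest) e with
        | none => simp [fin]
        | some i =>
          simp only []
          have : out.length + (i + 1) = (out ++ [v]).length + i := by simp; omega
          simp [this]
      · rw [show bloop e mode (v :: rest) out cut
              = bloop e mode rest (out ++ [v]) cut from by simp [bloop, hne, hve]]
        rw [ih v (out ++ [v]) cut (by simp)]
        rw [show (lastIndex? (v :: cAux v rest) e)
              = (match lastIndex? (cAux v rest) e with
                 | some i => some (i + 1)
                 | none => none) from by simp [lastIndex?, hve]]
        cases h : lastIndex? (cAux v rest) e with
        | none => simp [fin]
        | some i =>
          simp only []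
          have : out.length + (i + 1) = (out ++ [v]).length + i := by simp; omega
          simp [this]

theorem alt_eq_fin (raw_seq : List Int) (e : Int) (mode : String) :
    process_seq_for_slt_alt raw_seq e mode = fin (bloop e mode raw_seq [] none) := rfl

theorem slice_to_zero (xs : List Int) : PySem.List.slice xs none (some (0 : Int)) = [] := by
  simpa using PySem.List.slice_to_natCast xs 0

theorem slice_to_succ (xs : List Int) (j : Nat) :
    PySem.List.slice xs none (some ((j : Int) + 1)) = List.take (j + 1) xs := by
  simpa using PySem.List.slice_to_natCast xs (j + 1)

theorem slice_to_sub (xs : List Int) (m j : Nat) (h : j ≤ m) :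
    PySem.List.slice xs none (some ((m : Int) - (j : Int))) = List.take (m - j) xs := by
  have := PySem.List.slice_to_natCast xs (m - j)
  rwa [Int.natCast_sub h] at this

theorem main_eq (raw_seq : List Int) (e : Int) (mode : String) :
    process_seq_for_slt raw_seq e mode = process_seq_for_slt_alt raw_seq e mode := by
  cases raw_seq with
  | nil => by_cases hm : mode = "first" <;>
      simp [process_seq_for_slt, process_seq_for_slt_alt, collapse, bloop]
  | cons a rest =>
    have hx : collapse (a :: rest) = a :: cAux a rest := rfl
    rw [alt_eq_fin]
    by_cases hm : mode = "first"
    · subst hm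
      by_cases hae : a = e
      · -- first element is the token: B breaks with cut 0, A takes up to index 0
        subst hae
        rw [show bloop a "first" (a :: rest) [] none = ([a], some 0) from by simp [bloop]]
        have hidx : List.idxOf? a (a :: cAux a rest) = some 0 := by
          simpa [PySem.List.index?_eq_idxOf?] using PySem.List.index?_cons_self a (cAux a rest)
        simp [process_seq_for_slt, hx, hidx, fin, slice_to_zero]
      · rw [show bloop e "first" (a :: rest) [] none = bloop e "first" rest [a] none from by
          simp [bloop, hae]]
        rw [bloop_first e rest a [a] (by simp)]
        by_cases hmem : e ∈ a :: cAux a rest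
        · have hmL : e ∈ cAux a rest := by
            cases hmem with
            | head => exact absurd rfl hae
            | tail _ h => exact h
          cases hj : PySem.List.index? (cAux a rest) e with
          | none => rw [PySem.List.index?_eq_none_iff] at hj; exact absurd hmL hj
          | some j =>
            have hidx : PySem.List.index? (a :: cAux a rest) e = some (j + 1) := by
              rw [PySem.List.index?_cons_of_ne _ (fun h : a = e => hae h), hj]; rfl
            rw [PySem.List.index?_eq_idxOf?] at hidx
            simp [process_seq_for_slt, hx, hmem, hidx, slice_to_succ]
        · have hjn : PySem.List.index? (cAux a rest) e = none := by
            rw [PySem.List.index?_eq_none_iff]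
            exact fun h => hmem (List.mem_cons_of_mem _ h)
          rw [PySem.List.index?_eq_idxOf?] at hjn
          simp [process_seq_for_slt, hx, hmem, hjn]
    · by_cases hae : a = e
      · subst hae
        rw [show bloop a mode (a :: rest) [] none = bloop a mode rest [a] (some 0) from by
          simp [bloop, hm]]
        rw [bloop_last a mode hm rest a [a] (some 0) (by simp)]
        have hmem : a ∈ a :: cAux a rest := List.mem_cons_self
        have hrev := lastIndex?_rev (a :: cAux a rest) a
        cases hj : PySem.List.index? (a :: cAux a rest).reverse a with
        | none => rw [PySem.List.index?_eq_none_iff] at hj; simp at hj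
        | some j =>
          obtain ⟨hlt, -, -⟩ := PySem.List.getElem_of_index?_eq_some hj
          simp only [List.length_reverse, List.length_cons] at hlt
          rw [hj] at hrev
          simp only [Option.map_some, List.length_cons] at hrev
          simp only [lastIndex?] at hrev
          rw [PySem.List.index?_eq_idxOf?] at hj
          simp only [List.reverse_cons] at hj
          cases hL2 : lastIndex? (cAux a rest) a with
          | none =>
            rw [hL2] at hrev
            simp at hrev
            simp [process_seq_for_slt, hx, hmem, hm, hj, fin,
              slice_to_sub _ _ _ (by omega : j ≤ (cAux a rest).length)]
            omega
          | some i =>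
            rw [hL2] at hrev
            simp at hrev
            simp [process_seq_for_slt, hx, hmem, hm, hj,
              slice_to_sub _ _ _ (by omega : j ≤ (cAux a rest).length)]
            omega
      · rw [show bloop e mode (a :: rest) [] none = bloop e mode rest [a] none from by
          simp [bloop, hae]]
        rw [bloop_last e mode hm rest a [a] none (by simp)]
        by_cases hmem : e ∈ a :: cAux a rest
        · have hrev := lastIndex?_rev (a :: cAux a rest) e
          cases hj : PySem.List.index? (a :: cAux a rest).reverse e with
          | none =>
            rw [PySem.List.index?_eq_none_iff] at hj
            simp at hj
            exact absurd hmem (by simp [hj.1, hj.2])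
          | some j =>
            obtain ⟨hlt, -, -⟩ := PySem.List.getElem_of_index?_eq_some hj
            simp only [List.length_reverse, List.length_cons] at hlt
            rw [hj] at hrev
            simp only [Option.map_some, List.length_cons] at hrev
            simp only [lastIndex?, if_neg hae] at hrev
            rw [PySem.List.index?_eq_idxOf?] at hj
            simp only [List.reverse_cons] at hj
            cases hL2 : lastIndex? (cAux a rest) e with
            | none =>
              rw [hL2] at hrev
              simp at hrev
            | some i =>
              rw [hL2] at hrev
              simp at hrev
              simp [process_seq_for_slt, hx, hmem, hm, hj,
                slice_to_sub _ _ _ (by omega : j ≤ (cAux a rest).length)]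
              omega
        · have hLn : lastIndex? (cAux a rest) e = none := by
            rw [lastIndex?_eq_none_iff]
            exact fun h => hmem (List.mem_cons_of_mem _ h)
          simp [process_seq_for_slt, hx, hmem, hLn, fin]

-- ===== VERDICT (by name: the statement is the Claim_ definition above) =====
theorem process_seq_for_slt_spec : Claim_equal_process_seq_for_slt := by
  intro raw_seq e mode _
  exact main_eq raw_seq e mode
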